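-- pv_equiv track=rewrite | github.com/mupisystems/django-risk-guardian | risk_guardian/analyzers/email.py | _hex_suffix_length
-- ===== SOURCE A (Python) =====
-- def _hex_suffix_length(local_part: str) -> int:
--     """Return the length of the trailing hex-like suffix (digits + a-f)."""
--     suffix_len = 0
--     for c in reversed(local_part.lower()):
--         if c in "0123456789abcdef":
--             suffix_len += 1
--         else:
--             break
--     return suffix_len
-- ===== SOURCE B (Python) =====
-- def _hex_suffix_length(local_part: str) -> int:
--     """Return the length of the trailing hex-like suffix (digits + a-f)."""
--     s = local_part.lower()
--     last_nonhex = -1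
--     for i, c in enumerate(s):
--         if c not in "0123456789abcdef":
--             last_nonhex = i
--     return len(s) - 1 - last_nonhex
-- ===== Notes on version B (the rewrite author's own statement) =====
-- stated objective: alternative
-- what changed: Replaces the reversed() loop with break by a single forward pass that records the index of the last non-hex character and computes the suffix length arithmetically as len(s)-1-last_nonhex.
import Mathlib
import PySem

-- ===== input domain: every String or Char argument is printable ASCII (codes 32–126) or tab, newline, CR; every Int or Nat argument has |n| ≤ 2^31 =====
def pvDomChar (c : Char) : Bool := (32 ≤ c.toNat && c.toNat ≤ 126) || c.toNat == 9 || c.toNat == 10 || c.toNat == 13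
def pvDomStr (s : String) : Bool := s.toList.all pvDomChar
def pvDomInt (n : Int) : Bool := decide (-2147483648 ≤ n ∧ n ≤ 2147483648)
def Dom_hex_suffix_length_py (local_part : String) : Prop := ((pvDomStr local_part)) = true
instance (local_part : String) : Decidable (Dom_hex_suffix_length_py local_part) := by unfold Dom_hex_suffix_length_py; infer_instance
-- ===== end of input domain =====

-- B replaces A's reversed()-with-break loop by one forward pass recording the last non-hex index; same return value, alternative decomposition.


-- ===== PORT A =====
-- loop over reversed(local_part.lower()) counting until first non-hex char (break)
def pvCountHexA : List Char → Int
  | [] => 0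
  | c :: t => if ("0123456789abcdef".toList.contains c) then pvCountHexA t + 1 else 0

def hex_suffix_length_py (local_part : String) : Int :=
  pvCountHexA ((PySem.Str.lower local_part).toList.reverse)

-- ===== PORT B =====
-- forward enumerate loop: state = (index, last_nonhex)
def pvStepB (st : Nat × Int) (c : Char) : Nat × Int :=
  (st.1 + 1, if "0123456789abcdef".toList.contains c then st.2 else (st.1 : Int))

def hex_suffix_length_py_alt (local_part : String) : Int :=
  let s := (PySem.Str.lower local_part).toList
  ((s.length : Int)) - 1 - (s.foldl pvStepB (0, -1)).2

-- ===== PRECONDITION & SPEC =====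
def Spec_hex_suffix_length_py (local_part : String) (out : Int) : Prop := out = hex_suffix_length_py_alt local_part
instance (local_part : String) (out : Int) : Decidable (Spec_hex_suffix_length_py local_part out) := by unfold Spec_hex_suffix_length_py; infer_instance

-- ===== CLAIM (what is proved, stated in full; the proofs are below) =====
def Claim_equal_hex_suffix_length_py : Prop := ∀ (local_part : String), Dom_hex_suffix_length_py local_part → Spec_hex_suffix_length_py local_part (hex_suffix_length_py local_part)

-- ===== LEMMAS AND PROOFS =====
theorem pvStepB_fst (l : List Char) (i : Nat) (last : Int) :
    (l.foldl pvStepB (i, last)).1 = i + l.length := by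
  induction l generalizing i last with
  | nil => simp
  | cons c t ih => simp [pvStepB, ih, Nat.add_assoc, Nat.add_comm 1]

theorem pvB_eq_A (l : List Char) :
    ((l.length : Int)) - 1 - (l.foldl pvStepB (0, -1)).2 = pvCountHexA l.reverse := by
  induction l using List.reverseRecOn with
  | nil => simp [pvCountHexA]
  | append_singleton t c ih =>
    have hfold : t.foldl pvStepB (0, -1) = (t.length, (t.foldl pvStepB (0, -1)).2) := by
      have h := pvStepB_fst t 0 (-1)
      exact Prod.ext (by simpa using h) rfl
    rw [List.foldl_append, hfold, List.reverse_append]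
    simp only [List.foldl_cons, List.foldl_nil, List.reverse_singleton, List.singleton_append,
      pvStepB, pvCountHexA]
    by_cases h : ("0123456789abcdef".toList.contains c) = true
    · simp only [h, List.length_append, List.length_singleton]
      rw [← ih]; push_cast; ring
    · simp only [h, List.length_append, List.length_singleton]
      rw [if_neg (by simp)]
      push_cast; ring

-- ===== VERDICT (by name: the statement is the Claim_ definition above) =====
theorem hex_suffix_length_py_spec : Claim_equal_hex_suffix_length_py := by
  intro s _
  unfold Spec_hex_suffix_length_py hex_suffix_length_py hex_suffix_length_py_alt
  exact (pvB_eq_A _).symm
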